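-- pv_equiv track=rewrite | github.com/jeongmin-seo/SocialRelation | grouping_by_optimization/optimization.py | result_packaging
-- ===== SOURCE A (Python) =====
-- def result_packaging(_result_groups, _num_heads):
--     new_result = [group for group in _result_groups]
--     for head_idx in range(_num_heads):
--         is_found = False
--         for group in _result_groups:
--             if head_idx in group:
--                 is_found = True
--                 break
--         if not is_found:
--             new_result.append(set([head_idx]))
--     return new_result
-- ===== SOURCE B (Python) =====
-- def result_packaging(_result_groups, _num_heads):
--     covered = set()
--     for group in _result_groups:
--         covered.update(group)
--     return list(_result_groups) + [{i} for i in range(_num_heads) if i not in covered]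
-- ===== Notes on version B (the rewrite author's own statement) =====
-- stated objective: faster
-- what changed: B precomputes one union set of all covered indices and appends singletons for the uncovered ones in a single filtered pass, instead of A's per-head linear scan over every group with an is_found/break flag.
import Mathlib
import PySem

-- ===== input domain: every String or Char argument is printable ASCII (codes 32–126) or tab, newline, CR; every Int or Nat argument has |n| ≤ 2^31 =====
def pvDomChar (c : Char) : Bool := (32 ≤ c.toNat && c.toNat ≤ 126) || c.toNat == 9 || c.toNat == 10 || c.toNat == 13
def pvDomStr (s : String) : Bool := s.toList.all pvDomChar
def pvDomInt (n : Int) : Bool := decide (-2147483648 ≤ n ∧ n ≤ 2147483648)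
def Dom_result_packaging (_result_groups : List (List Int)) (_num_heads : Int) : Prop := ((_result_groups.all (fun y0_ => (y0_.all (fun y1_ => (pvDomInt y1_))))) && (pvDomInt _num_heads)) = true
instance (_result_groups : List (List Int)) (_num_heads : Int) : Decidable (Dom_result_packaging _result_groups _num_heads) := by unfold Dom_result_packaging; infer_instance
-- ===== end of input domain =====

-- B replaces A's per-head scan over all groups by one precomputed union set of covered
-- indices plus a single filtered pass over range(_num_heads).

-- ===== PORT A =====
-- inner 'for group in _result_groups: if head_idx in group: is_found = True; break'
def pvFindLoop (gs : List (List Int)) (h : Int) : Bool :=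
  match gs with
  | [] => false
  | g :: rest => if g.contains h then true else pvFindLoop rest h

def result_packaging (_result_groups : List (List Int)) (_num_heads : Int) : List (List Int) :=
  (PySem.List.pyRange 0 _num_heads 1).foldl
    (fun new_result head_idx =>
      if pvFindLoop _result_groups head_idx then new_result
      else new_result ++ [[head_idx]])
    (_result_groups.map (fun group => group))

-- ===== PORT B =====
def result_packaging_alt (_result_groups : List (List Int)) (_num_heads : Int) : List (List Int) :=
  let covered : PySem.Set Int :=
    _result_groups.foldl (fun s group => PySem.Set.update s group) PySem.Set.empty
  _result_groups ++
    ((PySem.List.pyRange 0 _num_heads 1).filter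
      (fun i => !(PySem.Set.contains covered i))).map (fun i => [i])

-- ===== PRECONDITION & SPEC =====
def Spec_result_packaging (_result_groups : List (List Int)) (_num_heads : Int) (out : List (List Int)) : Prop := out = result_packaging_alt _result_groups _num_heads
instance (_result_groups : List (List Int)) (_num_heads : Int) (out : List (List Int)) : Decidable (Spec_result_packaging _result_groups _num_heads out) := by unfold Spec_result_packaging; infer_instance

-- ===== CLAIM (what is proved, stated in full; the proofs are below) =====
def Claim_equal_result_packaging : Prop := ∀ (_result_groups : List (List Int)) (_num_heads : Int), Dom_result_packaging _result_groups _num_heads → Spec_result_packaging _result_groups _num_heads (result_packaging _result_groups _num_heads)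

-- ===== LEMMAS AND PROOFS =====

theorem pvFindLoop_iff (gs : List (List Int)) (h : Int) :
    pvFindLoop gs h = true ↔ ∃ g ∈ gs, h ∈ g := by
  induction gs with
  | nil => simp [pvFindLoop]
  | cons g rest ih =>
    simp only [pvFindLoop]
    by_cases hc : g.contains h = true
    · rw [if_pos hc]
      simp [List.contains_iff_mem.mp hc]
    · rw [if_neg hc, ih]
      constructor
      · rintro ⟨g', hg', hm⟩; exact ⟨g', List.mem_cons_of_mem _ hg', hm⟩
      · rintro ⟨g', hg', hm⟩
        rcases List.mem_cons.mp hg' with rfl | hg'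
        · exact absurd (List.contains_iff_mem.mpr hm) hc
        · exact ⟨g', hg', hm⟩

theorem mem_foldl_update (gs : List (List Int)) (s : PySem.Set Int) (y : Int) :
    y ∈ gs.foldl (fun s g => PySem.Set.update s g) s ↔ y ∈ s ∨ ∃ g ∈ gs, y ∈ g := by
  induction gs generalizing s with
  | nil => simp
  | cons g rest ih =>
    simp only [List.foldl_cons, ih, PySem.Set.mem_update]
    constructor
    · rintro (⟨h | h⟩ | ⟨g', hg', hm⟩)
      · exact Or.inl h
      · exact Or.inr ⟨g, List.mem_cons_self, h⟩
      · exact Or.inr ⟨g', List.mem_cons_of_mem _ hg', hm⟩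
    · rintro (h | ⟨g', hg', hm⟩)
      · exact Or.inl (Or.inl h)
      · rcases List.mem_cons.mp hg' with rfl | hg'
        · exact Or.inl (Or.inr hm)
        · exact Or.inr ⟨g', hg', hm⟩

theorem covered_eq_findLoop (gs : List (List Int)) (i : Int) :
    PySem.Set.contains (gs.foldl (fun s g => PySem.Set.update s g) PySem.Set.empty) i
      = pvFindLoop gs i := by
  by_cases h : pvFindLoop gs i = true
  · rw [h]
    exact (PySem.Set.contains_iff _ _).mpr ((mem_foldl_update gs PySem.Set.empty i).mpr
      (Or.inr ((pvFindLoop_iff gs i).mp h)))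
  · rw [Bool.eq_false_iff.mpr h]
    refine Bool.eq_false_iff.mpr fun hc => h ?_
    rcases (mem_foldl_update gs PySem.Set.empty i).mp ((PySem.Set.contains_iff _ _).mp hc) with h0 | h1
    · simp [PySem.Set.empty] at h0
    · exact (pvFindLoop_iff gs i).mpr h1

-- ===== VERDICT (by name: the statement is the Claim_ definition above) =====
theorem result_packaging_spec : Claim_equal_result_packaging := by
  intro gs n _
  unfold Spec_result_packaging result_packaging result_packaging_alt
  have hfun : (fun (acc : List (List Int)) (h : Int) =>
      if pvFindLoop gs h then acc else acc ++ [[h]])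
      = fun acc h => if (!pvFindLoop gs h) = true then acc ++ [(fun i : Int => [i]) h] else acc := by
    funext acc h
    by_cases hc : pvFindLoop gs h = true <;> simp [hc]
  rw [hfun, PySem.List.foldl_append_if]
  simp only [List.map_id_fun', id]
  congr 1
  apply congrArg
  apply List.filter_congr
  intro i _
  rw [covered_eq_findLoop]
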